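-- pv_equiv track=rewrite | github.com/Time-Coder/Glass-Engine | cgmath/helper.py | generate_getter_swizzles
-- ===== SOURCE A (Python) =====
-- import itertools
-- from typing import List, Set, Dict, Any
--
-- def generate_getter_swizzles(char_sets:List[str])->Set[str]:
--     result:List[str] = []
--
--     for char_set in char_sets:
--         for length in range(1, 4 + 1):
--             for combo in itertools.product(char_set, repeat=length):
--                 swizzle = ''.join(combo)
--                 result.append(swizzle)
--
--     return result
-- ===== SOURCE B (Python) =====
-- def generate_getter_swizzles(char_sets):
--     result = []
--     for char_set in char_sets:
--         prev = [c for c in char_set]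
--         result += prev
--         for _ in range(3):
--             prev = [p + c for p in prev for c in char_set]
--             result += prev
--     return result
-- ===== Notes on version B (the rewrite author's own statement) =====
-- stated objective: simpler
-- what changed: Drops itertools.product: B keeps a running list of the previous length's swizzles and extends each by one character three times, appending each batch, instead of recomputing an independent cartesian product for every length 1..4.
import Mathlib
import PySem

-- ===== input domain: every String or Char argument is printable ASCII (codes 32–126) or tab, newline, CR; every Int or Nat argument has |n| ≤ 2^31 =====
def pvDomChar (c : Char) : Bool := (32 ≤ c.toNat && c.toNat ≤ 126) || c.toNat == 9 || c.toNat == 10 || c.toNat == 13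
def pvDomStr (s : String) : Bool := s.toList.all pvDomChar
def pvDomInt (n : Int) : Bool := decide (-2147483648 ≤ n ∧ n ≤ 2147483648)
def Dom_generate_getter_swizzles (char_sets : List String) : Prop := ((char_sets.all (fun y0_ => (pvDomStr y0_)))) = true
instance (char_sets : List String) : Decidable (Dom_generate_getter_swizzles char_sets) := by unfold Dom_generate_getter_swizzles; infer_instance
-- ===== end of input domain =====

-- B builds each longer swizzle by extending the previous length's batch instead of an itertools-style product per length (simpler decomposition, same cost).


-- ===== PORT A =====
-- itertools.product(char_set, repeat=n) in position-major order, combos as List Char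
def pvProduct (cs : List Char) : Nat → List (List Char)
  | 0 => [[]]
  | n+1 => cs.flatMap (fun c => (pvProduct cs n).map (fun rest => c :: rest))

def generate_getter_swizzles (char_sets : List String) : List String :=
  char_sets.foldl (fun result char_set =>
    (PySem.List.pyRange 1 5 1).foldl (fun result length =>
      result ++ (pvProduct char_set.toList length.toNat).map (fun combo => String.ofList combo))
      result) []

-- ===== PORT B =====
-- one step of Source B's inner loop: extend every previous swizzle by one character
def pvStep (cs : List Char) (prev : List String) : List String :=
  prev.flatMap (fun p => cs.map (fun c => p ++ String.ofList [c]))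

def generate_getter_swizzles_alt (char_sets : List String) : List String :=
  char_sets.foldl (fun result char_set =>
    let prev := char_set.toList.map (fun c => String.ofList [c])
    let result := result ++ prev
    ((List.range 3).foldl (fun (st : List String × List String) _ =>
        let prev := pvStep char_set.toList st.2
        (st.1 ++ prev, prev))
      (result, prev)).1) []

-- ===== PRECONDITION & SPEC =====
def Spec_generate_getter_swizzles (char_sets : List String) (out : List String) : Prop := out = generate_getter_swizzles_alt char_sets
instance (char_sets : List String) (out : List String) : Decidable (Spec_generate_getter_swizzles char_sets out) := by unfold Spec_generate_getter_swizzles; infer_instance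

-- ===== CLAIM (what is proved, stated in full; the proofs are below) =====
def Claim_equal_generate_getter_swizzles : Prop := ∀ (char_sets : List String), Dom_generate_getter_swizzles char_sets → Spec_generate_getter_swizzles char_sets (generate_getter_swizzles char_sets)

-- ===== LEMMAS AND PROOFS =====

lemma pvFlatMap_single {A B : Type} (f : A → B) (l : List A) :
    l.flatMap (fun x => [f x]) = l.map f := by
  induction l <;> simp_all

-- right-extension characterisation of the position-major product
lemma pvProduct_succ (cs : List Char) (n : Nat) :
    pvProduct cs (n+1) = (pvProduct cs n).flatMap (fun p => cs.map (fun c => p ++ [c])) := by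
  induction n with
  | zero =>
    show List.flatMap (fun c => [[c]]) cs = List.flatMap _ [[]]
    rw [List.flatMap_cons, List.flatMap_nil, List.append_nil,
      ← pvFlatMap_single (fun c => ([] ++ [c] : List Char)) cs]
    simp
  | succ n ih =>
    conv_lhs => rw [pvProduct, ih]
    rw [pvProduct]
    simp [List.flatMap_def, List.map_map, Function.comp_def, List.flatten_flatten]

lemma step_eq (cs : List Char) (n : Nat) :
    pvStep cs ((pvProduct cs n).map (fun combo => String.ofList combo))
      = (pvProduct cs (n+1)).map (fun combo => String.ofList combo) := by
  rw [pvProduct_succ]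
  simp [pvStep, List.map_flatMap, List.flatMap_map, List.map_map, Function.comp_def]

lemma pyRange15 : PySem.List.pyRange 1 5 1 = [1, 2, 3, 4] := by decide

lemma inner_eq (result : List String) (char_set : String) :
    (PySem.List.pyRange 1 5 1).foldl (fun result length =>
      result ++ (pvProduct char_set.toList length.toNat).map (fun combo => String.ofList combo))
      result
    = (let prev := char_set.toList.map (fun c => String.ofList [c])
       let result := result ++ prev
       ((List.range 3).foldl (fun (st : List String × List String) _ =>
          let prev := pvStep char_set.toList st.2
          (st.1 ++ prev, prev))
        (result, prev)).1) := by
  rw [pyRange15]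
  have h1 : char_set.toList.map (fun c => String.ofList [c])
      = (pvProduct char_set.toList 1).map (fun combo => String.ofList combo) := by
    show _ = List.map _ (List.flatMap (fun c => [[c]]) char_set.toList)
    rw [pvFlatMap_single (fun c => ([c] : List Char)), List.map_map]
    rfl
  rw [h1]
  show _ = (((List.range 3).foldl (fun (st : List String × List String) _ =>
      (st.1 ++ pvStep char_set.toList st.2, pvStep char_set.toList st.2))
      (result ++ (pvProduct char_set.toList 1).map (fun combo => String.ofList combo),
       (pvProduct char_set.toList 1).map (fun combo => String.ofList combo))).1)
  simp only [List.range_succ, List.range_zero, List.foldl_append, List.foldl_cons,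
    List.foldl_nil, List.nil_append, step_eq]
  simp [List.append_assoc]

theorem foldl_funext {A B : Type} (f g : A → B → A) (h : ∀ a b, f a b = g a b) (init : A)
    (l : List B) : l.foldl f init = l.foldl g init := by
  induction l generalizing init with
  | nil => rfl
  | cons x xs ih => simp only [List.foldl, h, ih]

-- ===== VERDICT (by name: the statement is the Claim_ definition above) =====
theorem generate_getter_swizzles_spec : Claim_equal_generate_getter_swizzles := by
  intro char_sets _
  unfold Spec_generate_getter_swizzles generate_getter_swizzles generate_getter_swizzles_alt
  exact foldl_funext _ _ (fun a b => inner_eq a b) [] char_sets
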